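-- pv_equiv track=rewrite | github.com/hanshengzhu0001/matlab-rag-system | scripts/scan_file_types.py | analyze_matlab_content
-- ===== SOURCE A (Python) =====
-- from typing import Dict, List, Tuple
--
-- def analyze_matlab_content(extension_counts: Dict[str, int]) -> Dict[str, any]:
--     """
--     Analyze the file types specifically relevant for MATLAB RAG system.
--     """
--     analysis = {
--         'primary_content': {},
--         'supporting_content': {},
--         'media_content': {},
--         'other': {},
--         'totals': {}
--     }
--
--     # Primary content (what we want to process)
--     primary_extensions = ['.html', '.htm']
--     analysis['primary_content'] = {
--         ext: extension_counts.get(ext, 0)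
--         for ext in primary_extensions
--     }
--
--     # Supporting content
--     supporting_extensions = ['.json', '.xml', '.map', '.txt', '.properties']
--     analysis['supporting_content'] = {
--         ext: extension_counts.get(ext, 0)
--         for ext in supporting_extensions
--     }
--
--     # Media content
--     media_extensions = ['.png', '.jpg', '.jpeg', '.gif', '.svg', '.ico']
--     analysis['supporting_content'].update({
--         ext: extension_counts.get(ext, 0)
--         for ext in media_extensions
--     })
--
--     # Other content
--     all_known = set(primary_extensions + supporting_extensions + media_extensions)
--     analysis['other'] = {
--         ext: count for ext, count in extension_counts.items()
--         if ext not in all_known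
--     }
--
--     # Calculate totals
--     analysis['totals'] = {
--         'primary_content': sum(analysis['primary_content'].values()),
--         'supporting_content': sum(analysis['supporting_content'].values()),
--         'other': sum(analysis['other'].values()),
--         'grand_total': sum(extension_counts.values())
--     }
--
--     return analysis
-- ===== SOURCE B (Python) =====
-- # B: single-pass categorization via a reverse-lookup table, instead of A's
-- # four separate comprehensions over fixed extension lists plus a filter pass.
--
-- PRIMARY = ('.html', '.htm')
-- SUPPORTING = ('.json', '.xml', '.map', '.txt', '.properties',
--               '.png', '.jpg', '.jpeg', '.gif', '.svg', '.ico')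
--
-- def analyze_matlab_content(extension_counts):
--     primary = dict.fromkeys(PRIMARY, 0)
--     supporting = dict.fromkeys(SUPPORTING, 0)
--     dest = {e: 'primary_content' for e in PRIMARY}
--     dest.update({e: 'supporting_content' for e in SUPPORTING})
--     buckets = {'primary_content': primary, 'supporting_content': supporting}
--     other = {}
--     for ext, count in extension_counts.items():
--         target = dest.get(ext)
--         if target is None:
--             other[ext] = count
--         else:
--             buckets[target][ext] = count
--     return {
--         'primary_content': primary,
--         'supporting_content': supporting,
--         'media_content': {},
--         'other': other,
--         'totals': {
--             'primary_content': sum(primary.values()),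
--             'supporting_content': sum(supporting.values()),
--             'other': sum(other.values()),
--             'grand_total': sum(extension_counts.values()),
--         },
--     }
-- ===== Notes on version B (the rewrite author's own statement) =====
-- stated objective: alternative
-- what changed: A builds each bucket with a dict comprehension that looks up every known extension (plus a separate filter pass for 'other'); B seeds zero-filled buckets, builds a reverse-lookup table extension->bucket once, and makes a single pass over the input items routing each to its bucket. Pre_ excludes association lists with duplicate keys, which represent no actual input since A's argument is a Python dict with distinct keys.
import Mathlib
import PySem

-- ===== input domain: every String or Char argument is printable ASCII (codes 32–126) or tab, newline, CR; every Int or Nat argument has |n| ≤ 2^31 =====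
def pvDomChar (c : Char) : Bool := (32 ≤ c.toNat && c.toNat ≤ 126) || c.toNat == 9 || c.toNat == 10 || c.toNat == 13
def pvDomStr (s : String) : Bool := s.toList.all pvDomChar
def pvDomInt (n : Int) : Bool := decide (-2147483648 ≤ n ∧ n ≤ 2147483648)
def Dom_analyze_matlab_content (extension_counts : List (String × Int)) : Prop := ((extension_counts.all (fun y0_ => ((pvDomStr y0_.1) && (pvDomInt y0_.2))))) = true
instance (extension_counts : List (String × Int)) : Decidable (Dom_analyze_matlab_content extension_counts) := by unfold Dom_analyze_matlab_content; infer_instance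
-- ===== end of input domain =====

-- B replaces A's per-category dict comprehensions (one lookup per known extension plus a
-- filtering pass) by zero-seeded buckets, a reverse-lookup table extension → bucket, and a
-- single pass over the input items; return value proved equal (objective: alternative).

-- ===== PORT A =====
def pvPrimaryExts : List String := [".html", ".htm"]
def pvSupportingExts : List String := [".json", ".xml", ".map", ".txt", ".properties"]
def pvMediaExts : List String := [".png", ".jpg", ".jpeg", ".gif", ".svg", ".ico"]

def analyze_matlab_content (extension_counts : List (String × Int)) : List (String × List (String × Int)) :=
  let d : PySem.Dict String Int := PySem.Dict.mk extension_counts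
  let primary := pvPrimaryExts.map (fun ext => (ext, d.getD ext 0))
  let supporting0 := PySem.Dict.mk (pvSupportingExts.map (fun ext => (ext, d.getD ext 0)))
  let supporting := (supporting0.update (pvMediaExts.map (fun ext => (ext, d.getD ext 0)))).items
  let allKnown := PySem.Set.ofList (pvPrimaryExts ++ pvSupportingExts ++ pvMediaExts)
  let other := extension_counts.filter (fun p => !(PySem.Set.contains allKnown p.1))
  let totals := [("primary_content", (primary.map (·.2)).sum),
                 ("supporting_content", (supporting.map (·.2)).sum),
                 ("other", (other.map (·.2)).sum),
                 ("grand_total", (extension_counts.map (·.2)).sum)]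
  [("primary_content", primary),
   ("supporting_content", supporting),
   ("media_content", []),
   ("other", other),
   ("totals", totals)]

-- ===== PORT B =====
def pvPrimaryB : List String := [".html", ".htm"]
def pvSupportingB : List String := [".json", ".xml", ".map", ".txt", ".properties",
                                    ".png", ".jpg", ".jpeg", ".gif", ".svg", ".ico"]
-- dest = {e: 'primary_content' for e in PRIMARY}; dest.update({e: 'supporting_content' for e in SUPPORTING})
def pvDest : PySem.Dict String String :=
  (PySem.Dict.mk (pvPrimaryB.map (fun e => (e, "primary_content")))).update
    (pvSupportingB.map (fun e => (e, "supporting_content")))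

-- the loop body: target = dest.get(ext); other[ext] = count / buckets[target][ext] = count
def pvStepB (st : PySem.Dict String Int × PySem.Dict String Int × PySem.Dict String Int)
    (kv : String × Int) : PySem.Dict String Int × PySem.Dict String Int × PySem.Dict String Int :=
  match pvDest.get? kv.1 with
  | none => (st.1, st.2.1, st.2.2.insert kv.1 kv.2)
  | some t => if t = "primary_content"
              then (st.1.insert kv.1 kv.2, st.2.1, st.2.2)
              else (st.1, st.2.1.insert kv.1 kv.2, st.2.2)

def analyze_matlab_content_alt (extension_counts : List (String × Int)) : List (String × List (String × Int)) :=
  let primary0 : PySem.Dict String Int := PySem.Dict.mk (pvPrimaryB.map (fun e => (e, (0:Int))))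
  let supporting0 : PySem.Dict String Int := PySem.Dict.mk (pvSupportingB.map (fun e => (e, (0:Int))))
  let st := extension_counts.foldl pvStepB (primary0, supporting0, PySem.Dict.empty)
  [("primary_content", st.1.items),
   ("supporting_content", st.2.1.items),
   ("media_content", []),
   ("other", st.2.2.items),
   ("totals", [("primary_content", st.1.values.sum),
               ("supporting_content", st.2.1.values.sum),
               ("other", st.2.2.values.sum),
               ("grand_total", (extension_counts.map (·.2)).sum)])]

-- ===== PRECONDITION & SPEC =====
-- Pre_ excludes association lists with duplicate keys: the argument is a Python dict, whose
-- keys are necessarily distinct, so such lists represent no input A can actually receive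
-- (on them first-vs-last-occurrence behaviour would be anybody's choice).
def Pre_analyze_matlab_content (extension_counts : List (String × Int)) : Prop :=
  (extension_counts.map (·.1)).Nodup
instance (extension_counts : List (String × Int)) : Decidable (Pre_analyze_matlab_content extension_counts) := by unfold Pre_analyze_matlab_content; infer_instance

def pvWitness_analyze_matlab_content : (List (String × Int)) := [(".html", 3), (".py", 1), (".png", 2)]

def Spec_analyze_matlab_content (extension_counts : List (String × Int)) (out : List (String × List (String × Int))) : Prop := out = analyze_matlab_content_alt extension_counts
instance (extension_counts : List (String × Int)) (out : List (String × List (String × Int))) : Decidable (Spec_analyze_matlab_content extension_counts out) := by unfold Spec_analyze_matlab_content; infer_instance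

-- ===== CLAIM (what is proved, stated in full; the proofs are below) =====
def Claim_equal_analyze_matlab_content : Prop := ∀ (extension_counts : List (String × Int)), Dom_analyze_matlab_content extension_counts → Pre_analyze_matlab_content extension_counts → Spec_analyze_matlab_content extension_counts (analyze_matlab_content extension_counts)

-- ===== LEMMAS AND PROOFS =====

-- pvDest.get? described by membership in B's two constant lists
lemma dest_get (k : String) :
    pvDest.get? k = if k ∈ pvPrimaryB then some "primary_content"
                    else if k ∈ pvSupportingB then some "supporting_content" else none := by
  by_cases h1 : k ∈ pvPrimaryB
  · simp only [pvPrimaryB, List.mem_cons, List.not_mem_nil, or_false] at h1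
    rcases h1 with rfl | rfl <;> decide
  · by_cases h2 : k ∈ pvSupportingB
    · simp only [pvSupportingB, List.mem_cons, List.not_mem_nil, or_false] at h2
      rcases h2 with rfl | rfl | rfl | rfl | rfl | rfl | rfl | rfl | rfl | rfl | rfl <;> decide
    · rw [if_neg h1, if_neg h2]
      simp only [pvPrimaryB, pvSupportingB, List.mem_cons, List.not_mem_nil, or_false, not_or] at h1 h2
      have e : pvDest = PySem.Dict.mk [(".html","primary_content"),(".htm","primary_content"),
        (".json","supporting_content"),(".xml","supporting_content"),(".map","supporting_content"),
        (".txt","supporting_content"),(".properties","supporting_content"),(".png","supporting_content"),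
        (".jpg","supporting_content"),(".jpeg","supporting_content"),(".gif","supporting_content"),
        (".svg","supporting_content"),(".ico","supporting_content")] := by decide
      rw [e]
      simp only [PySem.Dict.get?_mk_cons, beq_iff_eq]
      obtain ⟨a1, a2⟩ := h1
      obtain ⟨b1, b2, b3, b4, b5, b6, b7, b8, b9, b10, b11⟩ := h2
      rw [if_neg (Ne.symm a1), if_neg (Ne.symm a2), if_neg (Ne.symm b1), if_neg (Ne.symm b2),
        if_neg (Ne.symm b3), if_neg (Ne.symm b4), if_neg (Ne.symm b5), if_neg (Ne.symm b6),
        if_neg (Ne.symm b7), if_neg (Ne.symm b8), if_neg (Ne.symm b9), if_neg (Ne.symm b10),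
        if_neg (Ne.symm b11)]
      rfl

-- the two constant extension lists of B are disjoint
lemma disj (k : String) (h : k ∈ pvPrimaryB) : k ∉ pvSupportingB := by
  simp only [pvPrimaryB, List.mem_cons, List.not_mem_nil, or_false] at h
  rcases h with rfl | rfl <;> decide

-- the loop body, written with membership tests instead of the dest lookup
lemma step_eq (st : PySem.Dict String Int × PySem.Dict String Int × PySem.Dict String Int)
    (kv : String × Int) :
    pvStepB st kv =
      (if kv.1 ∈ pvPrimaryB then st.1.insert kv.1 kv.2 else st.1,
       if kv.1 ∈ pvSupportingB then st.2.1.insert kv.1 kv.2 else st.2.1,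
       if kv.1 ∈ pvPrimaryB ∨ kv.1 ∈ pvSupportingB then st.2.2 else st.2.2.insert kv.1 kv.2) := by
  unfold pvStepB
  rw [dest_get kv.1]
  by_cases h1 : kv.1 ∈ pvPrimaryB
  · rw [if_pos h1]
    simp [h1, disj kv.1 h1]
  · rw [if_neg h1]
    by_cases h2 : kv.1 ∈ pvSupportingB
    · rw [if_pos h2]; simp [h1, h2]
    · rw [if_neg h2]; simp [h1, h2]

-- the one-pass loop splits into three independent bucket loops
lemma foldl_step_split (ec : List (String × Int))
    (st : PySem.Dict String Int × PySem.Dict String Int × PySem.Dict String Int) :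
    ec.foldl pvStepB st =
      (ec.foldl (fun d kv => if kv.1 ∈ pvPrimaryB then d.insert kv.1 kv.2 else d) st.1,
       ec.foldl (fun d kv => if kv.1 ∈ pvSupportingB then d.insert kv.1 kv.2 else d) st.2.1,
       ec.foldl (fun d kv => if kv.1 ∈ pvPrimaryB ∨ kv.1 ∈ pvSupportingB then d else d.insert kv.1 kv.2) st.2.2) := by
  induction ec generalizing st with
  | nil => rfl
  | cons kv tl ih =>
    simp only [List.foldl_cons, step_eq]
    rw [ih]

lemma getD_mk_cons (k x : String) (v c : Int) (tl : List (String × Int)) :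
    (PySem.Dict.mk ((k, v) :: tl)).getD x c = if k == x then v else (PySem.Dict.mk tl).getD x c := by
  rw [PySem.Dict.getD_eq_get?_getD, PySem.Dict.getD_eq_get?_getD, PySem.Dict.get?_mk_cons]
  split <;> rfl

lemma getD_not_mem (x : String) (c : Int) (tl : List (String × Int)) (h : x ∉ tl.map (·.1)) :
    (PySem.Dict.mk tl).getD x c = c := by
  apply PySem.Dict.getD_of_get?_eq_none
  rw [PySem.Dict.get?_eq_none_iff_not_mem_keys]
  simpa [PySem.Dict.keys] using h

-- a conditional-insert loop over a zero-seeded dict realises .get(ext, seed) per seeded key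
lemma bucket_items (L : List String) (ec : List (String × Int)) (d : PySem.Dict String Int)
    (hkeys : d.keys = L) (hnd : (ec.map (·.1)).Nodup) :
    (ec.foldl (fun d kv => if kv.1 ∈ L then d.insert kv.1 kv.2 else d) d).items
      = d.items.map (fun p => (p.1, (PySem.Dict.mk ec).getD p.1 p.2)) := by
  induction ec generalizing d with
  | nil =>
    simp only [List.foldl_nil]
    have : ∀ p ∈ d.items, (p.1, (PySem.Dict.mk []).getD p.1 p.2) = p := by
      intro p _; rw [getD_not_mem p.1 p.2 [] (by simp)]
    rw [List.map_congr_left this, List.map_id']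
  | cons kv tl ih =>
    obtain ⟨k, v⟩ := kv
    simp only [List.map_cons, List.nodup_cons] at hnd
    obtain ⟨hk, hnd'⟩ := hnd
    by_cases hmem : k ∈ L
    · have hc : d.contains k = true := by
        rw [PySem.Dict.contains_iff_mem_keys, hkeys]; exact hmem
      simp only [List.foldl_cons, if_pos hmem]
      rw [ih (d.insert k v) (by rw [PySem.Dict.keys_insert_of_contains d v hc, hkeys]) hnd',
        PySem.Dict.items_insert_of_contains d v hc, List.map_map]
      apply List.map_congr_left
      intro p _
      by_cases hpk : p.1 = k
      · simp only [Function.comp, hpk, beq_self_eq_true, if_pos, getD_mk_cons]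
        simp [getD_not_mem k v tl hk]
      · have hb : (p.1 == k) = false := by simp [hpk]
        simp only [Function.comp, hb, Bool.false_eq_true, if_false, getD_mk_cons]
        have hb2 : (k == p.1) = false := by simp [Ne.symm hpk]
        simp [hb2]
    · simp only [List.foldl_cons, if_neg hmem]
      rw [ih d hkeys hnd']
      apply List.map_congr_left
      intro p hp
      have hpL : p.1 ∈ L := by
        rw [← hkeys]; exact PySem.Dict.mem_keys_of_mem_items d hp
      have : (k == p.1) = false := by
        simp only [beq_eq_false_iff_ne, ne_eq]
        rintro rfl; exact hmem hpL
      rw [getD_mk_cons, this, if_neg (by simp)]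

-- the fall-through branch collects exactly the unknown-key items, in order
lemma other_items (ec : List (String × Int)) (d : PySem.Dict String Int)
    (hfresh : ∀ k ∈ ec.map (·.1), d.contains k = false) (hnd : (ec.map (·.1)).Nodup) :
    (ec.foldl (fun d kv => if kv.1 ∈ pvPrimaryB ∨ kv.1 ∈ pvSupportingB then d else d.insert kv.1 kv.2) d).items
      = d.items ++ ec.filter (fun p => !(decide (p.1 ∈ pvPrimaryB) || decide (p.1 ∈ pvSupportingB))) := by
  induction ec generalizing d with
  | nil => simp
  | cons kv tl ih =>
    obtain ⟨k, v⟩ := kv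
    simp only [List.map_cons, List.nodup_cons] at hnd
    obtain ⟨hk, hnd'⟩ := hnd
    have hfk : d.contains k = false := hfresh k (by simp)
    by_cases hmem : k ∈ pvPrimaryB ∨ k ∈ pvSupportingB
    · simp only [List.foldl_cons, if_pos hmem, List.filter_cons]
      rw [ih d (fun k' h => hfresh k' (by simp [h])) hnd']
      rcases hmem with h | h <;> simp [h]
    · simp only [List.foldl_cons, if_neg hmem, List.filter_cons]
      rw [ih (d.insert k v) ?fresh hnd']
      · rw [PySem.Dict.items_insert_of_not_contains d v hfk]
        push Not at hmem
        simp [hmem.1, hmem.2]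
      case fresh =>
        intro k' h
        rw [PySem.Dict.contains_insert]
        have : (k' == k) = false := by
          simp only [beq_eq_false_iff_ne, ne_eq]; rintro rfl; exact hk h
        rw [this, Bool.false_or]
        exact hfresh k' (by simp [h])

-- A's all_known membership test, as B's two membership tests
lemma known_contains (k : String) :
    PySem.Set.contains (PySem.Set.ofList (pvPrimaryExts ++ pvSupportingExts ++ pvMediaExts)) k
      = (decide (k ∈ pvPrimaryB) || decide (k ∈ pvSupportingB)) := by
  have e : PySem.Set.ofList (pvPrimaryExts ++ pvSupportingExts ++ pvMediaExts)
      = pvPrimaryB ++ pvSupportingB := by decide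
  rw [e]
  simp only [PySem.Set.contains, List.contains_eq_mem, List.mem_append, Bool.decide_or]

-- ===== VERDICT (by name: the statement is the Claim_ definition above) =====
theorem analyze_matlab_content_spec : Claim_equal_analyze_matlab_content := by
  intro ec _ hpre
  have hnd : (ec.map (·.1)).Nodup := hpre
  unfold Spec_analyze_matlab_content analyze_matlab_content analyze_matlab_content_alt
  simp only [foldl_step_split]
  have hP : (ec.foldl (fun d kv => if kv.1 ∈ pvPrimaryB then d.insert kv.1 kv.2 else d)
      (PySem.Dict.mk (pvPrimaryB.map (fun e => (e, (0:Int)))))).items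
      = pvPrimaryB.map (fun e => (e, (PySem.Dict.mk ec).getD e 0)) := by
    rw [bucket_items pvPrimaryB ec _ (by decide) hnd, List.map_map]; rfl
  have hS : (ec.foldl (fun d kv => if kv.1 ∈ pvSupportingB then d.insert kv.1 kv.2 else d)
      (PySem.Dict.mk (pvSupportingB.map (fun e => (e, (0:Int)))))).items
      = pvSupportingB.map (fun e => (e, (PySem.Dict.mk ec).getD e 0)) := by
    rw [bucket_items pvSupportingB ec _ (by decide) hnd, List.map_map]; rfl
  have hO : (ec.foldl (fun d kv => if kv.1 ∈ pvPrimaryB ∨ kv.1 ∈ pvSupportingB then d else d.insert kv.1 kv.2)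
      (PySem.Dict.empty : PySem.Dict String Int)).items
      = ec.filter (fun p => !(decide (p.1 ∈ pvPrimaryB) || decide (p.1 ∈ pvSupportingB))) := by
    rw [other_items ec _ (by intro k _; simp [PySem.Dict.contains_empty]) hnd]
    simp [PySem.Dict.empty]
  have hA : (PySem.Dict.update
      (PySem.Dict.mk (pvSupportingExts.map (fun e => (e, (PySem.Dict.mk ec).getD e 0))))
      (pvMediaExts.map (fun e => (e, (PySem.Dict.mk ec).getD e 0)))).items
      = pvSupportingB.map (fun e => (e, (PySem.Dict.mk ec).getD e 0)) := by
    simp only [PySem.Dict.update]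
    rw [PySem.Dict.items_foldl_insert_fresh]
    · simp [pvSupportingExts, pvMediaExts, pvSupportingB]
    · intro a ha
      simp only [List.mem_map] at ha
      obtain ⟨e, he, rfl⟩ := ha
      rw [PySem.Dict.contains_eq_decide_mem_keys]
      simp only [PySem.Dict.keys, List.map_map]
      have hid : ((fun (x : String × Int) => x.1) ∘ fun e => (e, (PySem.Dict.mk ec).getD e 0))
          = fun e => e := rfl
      rw [hid, List.map_id']
      simp only [pvMediaExts, List.mem_cons, List.not_mem_nil, or_false] at he
      rcases he with rfl | rfl | rfl | rfl | rfl | rfl <;> decide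
    · simp only [List.map_map]
      show (pvMediaExts.map _).Nodup
      simp [pvMediaExts]
  have hFilt : (fun (p : String × Int) =>
        !(PySem.Set.contains (PySem.Set.ofList (pvPrimaryExts ++ pvSupportingExts ++ pvMediaExts)) p.1))
      = (fun p => !(decide (p.1 ∈ pvPrimaryB) || decide (p.1 ∈ pvSupportingB))) :=
    funext fun p => by rw [known_contains]
  simp only [hFilt, hA, hP, hS, hO, PySem.Dict.values]
  rfl
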